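-- pv_equiv track=rewrite | github.com/jeankassio/ComfyUI-AceStep_SFT | nodes.py | _remove_redundant_subset_tags
-- ===== SOURCE A (Python) =====
-- def _remove_redundant_subset_tags(tags):
--     output = []
--     lowered = [tag.lower() for tag in tags]
--     for index, tag in enumerate(tags):
--         parts = lowered[index].split()
--         is_subset = False
--         for other_index, other_tag in enumerate(lowered):
--             if index == other_index:
--                 continue
--             other_parts = other_tag.split()
--             if len(other_parts) > len(parts) and all(part in other_parts for part in parts):
--                 is_subset = True
--                 break
--         if not is_subset:
--             output.append(tag)
--     return output
-- ===== SOURCE B (Python) =====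
-- def _remove_redundant_subset_tags(tags):
--     words_per_tag = [tag.lower().split() for tag in tags]
--     postings = {}
--     for i, words in enumerate(words_per_tag):
--         for w in words:
--             postings.setdefault(w, set()).add(i)
--     all_idx = set(range(len(tags)))
--     output = []
--     for i, tag in enumerate(tags):
--         words = words_per_tag[i]
--         cand = all_idx
--         for w in words:
--             cand = cand & postings.get(w, set())
--         if not any(len(words_per_tag[j]) > len(words) for j in cand):
--             output.append(tag)
--     return output
-- ===== Notes on version B (the rewrite author's own statement) =====
-- stated objective: faster
-- what changed: Replaces the all-pairs word-containment scan by an inverted index (word -> set of tag indices) built in one pass; each tag's superset candidates are the intersection of the postings of its words, so only tags sharing all its words are examined.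
import Mathlib
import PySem

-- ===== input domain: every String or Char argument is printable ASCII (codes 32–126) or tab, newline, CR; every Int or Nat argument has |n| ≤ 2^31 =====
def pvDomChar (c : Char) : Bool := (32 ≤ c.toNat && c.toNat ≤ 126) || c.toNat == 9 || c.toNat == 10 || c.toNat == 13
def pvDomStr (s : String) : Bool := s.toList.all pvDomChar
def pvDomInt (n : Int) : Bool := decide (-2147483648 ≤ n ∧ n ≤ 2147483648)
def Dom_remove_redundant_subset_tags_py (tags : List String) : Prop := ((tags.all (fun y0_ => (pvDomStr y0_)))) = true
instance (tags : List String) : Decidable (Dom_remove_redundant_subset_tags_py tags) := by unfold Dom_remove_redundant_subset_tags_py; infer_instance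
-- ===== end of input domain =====

-- B replaces A's all-pairs subset scan by an inverted index word → set of tag indices; return values proved equal on all inputs.

-- ===== PORT A =====
-- inner 'for other_index, other_tag in enumerate(lowered)' loop with its break
def pyAInner (index : Int) (parts : List String) : List (Int × String) → Bool
  | [] => false
  | (oi, ot) :: rest =>
    if index = oi then pyAInner index parts rest
    else
      let other_parts := PySem.Str.split₀ ot
      if other_parts.length > parts.length && parts.all (fun part => other_parts.contains part)
      then true
      else pyAInner index parts rest

def remove_redundant_subset_tags_py (tags : List String) : List String :=
  let lowered := tags.map (fun tag => PySem.Str.lower tag)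
  (PySem.List.enumerate tags 0).foldl (fun output p =>
    let parts := PySem.Str.split₀ (PySem.List.pyGetD lowered p.1 "")
    let is_subset := pyAInner p.1 parts (PySem.List.enumerate lowered 0)
    if is_subset then output else output ++ [p.2]) []

-- ===== PORT B =====
def remove_redundant_subset_tags_py_alt (tags : List String) : List String :=
  let wordsPerTag := tags.map (fun tag => PySem.Str.split₀ (PySem.Str.lower tag))
  -- postings.setdefault(w, set()).add(i)  ==  d[w] = d.get(w, set()) ∪ {i}, position preserved
  let postings : PySem.Dict String (PySem.Set Int) :=
    (PySem.List.enumerate wordsPerTag 0).foldl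
      (fun d p => p.2.foldl
        (fun d w => d.modify w PySem.Set.empty (fun s => PySem.Set.add s p.1)) d)
      PySem.Dict.empty
  let allIdx : PySem.Set Int := PySem.Set.ofList (PySem.List.pyRange 0 (tags.length : Int) 1)
  (PySem.List.enumerate tags 0).foldl (fun output p =>
    let words := PySem.List.pyGetD wordsPerTag p.1 []
    let cand := words.foldl
      (fun c w => PySem.Set.inter c (postings.getD w PySem.Set.empty)) allIdx
    if cand.any (fun j => decide ((PySem.List.pyGetD wordsPerTag j []).length > words.length))
    then output else output ++ [p.2]) []

-- ===== PRECONDITION & SPEC =====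
def Spec_remove_redundant_subset_tags_py (tags : List String) (out : List String) : Prop := out = remove_redundant_subset_tags_py_alt tags
instance (tags : List String) (out : List String) : Decidable (Spec_remove_redundant_subset_tags_py tags out) := by unfold Spec_remove_redundant_subset_tags_py; infer_instance

-- ===== CLAIM (what is proved, stated in full; the proofs are below) =====
def Claim_equal_remove_redundant_subset_tags_py : Prop := ∀ (tags : List String), Dom_remove_redundant_subset_tags_py tags → Spec_remove_redundant_subset_tags_py tags (remove_redundant_subset_tags_py tags)

-- ===== LEMMAS AND PROOFS =====

-- A's inner loop (with its break) is an existence test over the enumerated list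
theorem pyAInner_eq_any (index : Int) (parts : List String) (l : List (Int × String)) :
    pyAInner index parts l =
      l.any (fun q => !decide (index = q.1) &&
        ((PySem.Str.split₀ q.2).length > parts.length &&
          parts.all (fun part => (PySem.Str.split₀ q.2).contains part))) := by
  induction l with
  | nil => rfl
  | cons q rest ih =>
    obtain ⟨oi, ot⟩ := q
    simp only [pyAInner, List.any_cons, ← ih]
    by_cases h : index = oi
    · simp [h]
    · simp only [if_neg h]
      split <;> simp_all

-- membership in the postings set for one word after the inner 'for w in words' loop
theorem mem_postings_inner (i : Int) (ws : List String) (d : PySem.Dict String (PySem.Set Int))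
    (w : String) (j : Int) :
    (j ∈ (ws.foldl (fun d w => d.modify w PySem.Set.empty (fun s => PySem.Set.add s i)) d).getD w PySem.Set.empty) ↔
      j ∈ d.getD w PySem.Set.empty ∨ (j = i ∧ w ∈ ws) := by
  induction ws generalizing d with
  | nil => simp
  | cons w0 rest ih =>
    simp only [List.foldl_cons, ih, PySem.Dict.getD_modify]
    by_cases h : w = w0
    · subst h
      simp only [reduceIte, PySem.Set.mem_add, List.mem_cons]
      tauto
    · rw [if_neg h]; simp only [List.mem_cons]; tauto

-- membership in the postings set after the whole index-building loop
theorem mem_postings (l : List (Int × List String)) (d : PySem.Dict String (PySem.Set Int))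
    (w : String) (j : Int) :
    (j ∈ (l.foldl (fun d p => p.2.foldl
        (fun d w => d.modify w PySem.Set.empty (fun s => PySem.Set.add s p.1)) d) d).getD w PySem.Set.empty) ↔
      j ∈ d.getD w PySem.Set.empty ∨ ∃ p ∈ l, p.1 = j ∧ w ∈ p.2 := by
  induction l generalizing d with
  | nil => simp
  | cons p rest ih =>
    simp only [List.foldl_cons, ih, mem_postings_inner, List.mem_cons]
    constructor
    · rintro (⟨h | h⟩ | h)
      · exact Or.inl h
      · exact Or.inr ⟨p, Or.inl rfl, h.1.symm ▸ rfl, h.2⟩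
      · obtain ⟨q, hq, h⟩ := h; exact Or.inr ⟨q, Or.inr hq, h⟩
    · rintro (h | ⟨q, hq | hq, h⟩)
      · exact Or.inl (Or.inl h)
      · subst hq; exact Or.inl (Or.inr ⟨h.1.symm, h.2⟩)
      · exact Or.inr ⟨q, hq, h⟩

-- membership in the intersection fold building the candidate set
theorem mem_inter_foldl (ws : List String) (g : String → PySem.Set Int) (s : PySem.Set Int) (j : Int) :
    (j ∈ ws.foldl (fun c w => PySem.Set.inter c (g w)) s) ↔ j ∈ s ∧ ∀ w ∈ ws, j ∈ g w := by
  induction ws generalizing s with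
  | nil => simp
  | cons w0 rest ih =>
    simp only [List.foldl_cons, ih, PySem.Set.mem_inter, List.mem_cons]
    constructor
    · rintro ⟨⟨hs, hw0⟩, h⟩
      exact ⟨hs, by rintro w (rfl | hw); exact hw0; exact h w hw⟩
    · rintro ⟨hs, h⟩
      exact ⟨⟨hs, h w0 (Or.inl rfl)⟩, fun w hw => h w (Or.inr hw)⟩

-- the per-index boolean conditions of the two programs agree
theorem cond_eq (tags : List String) (k : Nat) (hk : k < tags.length) :
    pyAInner (k : Int)
      (PySem.Str.split₀ (PySem.Str.lower tags[k]))
      (PySem.List.enumerate (tags.map (fun tag => PySem.Str.lower tag)) 0) =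
    (((PySem.Str.split₀ (PySem.Str.lower tags[k])).foldl
        (fun c w => PySem.Set.inter c
          (((PySem.List.enumerate (tags.map (fun tag => PySem.Str.split₀ (PySem.Str.lower tag))) 0).foldl
              (fun d p => p.2.foldl
                (fun d w => d.modify w PySem.Set.empty (fun s => PySem.Set.add s p.1)) d)
              PySem.Dict.empty).getD w PySem.Set.empty))
        (PySem.Set.ofList (PySem.List.pyRange 0 (tags.length : Int) 1))).any
      (fun j => decide ((PySem.List.pyGetD (tags.map (fun tag => PySem.Str.split₀ (PySem.Str.lower tag))) j []).length >
        (PySem.Str.split₀ (PySem.Str.lower tags[k])).length))) := by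
  have hWlen : (tags.map (fun tag => PySem.Str.split₀ (PySem.Str.lower tag))).length = tags.length := by
    simp
  rw [Bool.eq_iff_iff, pyAInner_eq_any, List.any_eq_true, List.any_eq_true]
  constructor
  · rintro ⟨q, hq, hb⟩
    rw [PySem.List.mem_enumerate_iff] at hq
    obtain ⟨m, hm, rfl⟩ := hq
    rw [List.length_map] at hm
    simp only [Bool.and_eq_true, Bool.not_eq_eq_eq_not, Bool.not_true, decide_eq_false_iff_not,
      decide_eq_true_eq, List.all_eq_true, List.contains_iff_mem, List.getElem_map,
      zero_add, gt_iff_lt] at hb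
    obtain ⟨hne, hlen, hall⟩ := hb
    refine ⟨(m : Int), ?_, ?_⟩
    · rw [mem_inter_foldl]
      refine ⟨?_, ?_⟩
      · rw [PySem.Set.mem_ofList, PySem.List.mem_pyRange_one]
        constructor <;> omega
      · intro w hw
        rw [mem_postings]
        refine Or.inr ⟨((m : Int), (tags.map (fun tag => PySem.Str.split₀ (PySem.Str.lower tag)))[m]'(by omega)), ?_, rfl, ?_⟩
        · rw [PySem.List.mem_enumerate_iff]
          exact ⟨m, by omega, by simp⟩
        · simpa using hall w hw
    · rw [PySem.List.pyGetD_eq_getElem _ [] (by omega) (by simp; omega)]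
      simp only [Int.toNat_natCast, List.getElem_map, decide_eq_true_eq, gt_iff_lt]
      exact hlen
  · rintro ⟨j, hj, hb⟩
    rw [mem_inter_foldl] at hj
    obtain ⟨hall0, hall⟩ := hj
    rw [PySem.Set.mem_ofList, PySem.List.mem_pyRange_one] at hall0
    have hjm : j.toNat < tags.length := by omega
    rw [PySem.List.pyGetD_eq_getElem _ [] (by omega) (by simp; omega)] at hb
    simp only [List.getElem_map, decide_eq_true_eq, gt_iff_lt] at hb
    have hne : (k : Int) ≠ 0 + j := by
      intro h
      have hjk : j.toNat = k := by omega
      subst hjk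
      exact lt_irrefl _ hb
    refine ⟨((0 : Int) + j, (tags.map (fun tag => PySem.Str.lower tag))[j.toNat]'(by simpa using hjm)), ?_, ?_⟩
    · rw [PySem.List.mem_enumerate_iff]
      exact ⟨j.toNat, by simpa using hjm, by rw [Prod.mk.injEq]; constructor; omega; rfl⟩
    · simp only [Bool.and_eq_true, Bool.not_eq_eq_eq_not, Bool.not_true, decide_eq_false_iff_not,
        decide_eq_true_eq, List.all_eq_true, List.contains_iff_mem, List.getElem_map, gt_iff_lt]
      refine ⟨hne, hb, ?_⟩
      intro part hpart
      have := hall part hpart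
      rw [mem_postings] at this
      rcases this with h | ⟨p, hp, hp1, hp2⟩
      · simp [PySem.Dict.getD_empty] at h
      · rw [PySem.List.mem_enumerate_iff] at hp
        obtain ⟨m', hm', rfl⟩ := hp
        simp only [zero_add] at hp1
        have : m' = j.toNat := by omega
        subst this
        simpa using hp2

-- ===== VERDICT (by name: the statement is the Claim_ definition above) =====
theorem remove_redundant_subset_tags_py_spec : Claim_equal_remove_redundant_subset_tags_py := by
  intro tags _
  unfold Spec_remove_redundant_subset_tags_py
  simp only [remove_redundant_subset_tags_py, remove_redundant_subset_tags_py_alt]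
  apply PySem.List.foldl_congr_mem'
  intro p hp acc
  rw [PySem.List.mem_enumerate_iff] at hp
  obtain ⟨k, hk, rfl⟩ := hp
  simp only [zero_add]
  rw [PySem.List.pyGetD_natCast, PySem.List.pyGetD_natCast,
      List.getD_eq_getElem _ _ (by simpa using hk), List.getD_eq_getElem _ _ (by simpa using hk),
      List.getElem_map, List.getElem_map]
  rw [cond_eq tags k hk]
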